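-- pv_equiv track=rewrite | github.com/kudoumakoto6523-design/Geomagnetic-Positioning-DDTW-Test-Code-With-Python | Geomag/algorithms.py | _expand_sensor_selectors
-- ===== SOURCE A (Python) =====
-- def _expand_sensor_selectors(selectors):
--     expanded = set()
--     if "sensor" in selectors:
--         expanded.update(
--             [
--                 "acc_x",
--                 "acc_y",
--                 "acc_z",
--                 "gyro_x",
--                 "gyro_y",
--                 "gyro_z",
--                 "mag_x",
--                 "mag_y",
--                 "mag_z",
--             ]
--         )
--     if "acc" in selectors:
--         expanded.update(["acc_x", "acc_y", "acc_z"])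
--     if "gyro" in selectors:
--         expanded.update(["gyro_x", "gyro_y", "gyro_z"])
--     if "mag" in selectors:
--         expanded.update(["mag_x", "mag_y", "mag_z"])
--     for selector in selectors:
--         if selector in {
--             "acc_x",
--             "acc_y",
--             "acc_z",
--             "gyro_x",
--             "gyro_y",
--             "gyro_z",
--             "mag_x",
--             "mag_y",
--             "mag_z",
--         }:
--             expanded.add(selector)
--     return sorted(expanded)
-- ===== SOURCE B (Python) =====
-- # B: instead of expanding selectors into a set and sorting, filter the fixed
-- # (already sorted) channel table: emit a channel iff its name, its group, or
-- # the blanket keyword "sensor" was selected. Output order is the table order.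
-- _CHANNELS = [
--     ("acc", "acc_x"), ("acc", "acc_y"), ("acc", "acc_z"),
--     ("gyro", "gyro_x"), ("gyro", "gyro_y"), ("gyro", "gyro_z"),
--     ("mag", "mag_x"), ("mag", "mag_y"), ("mag", "mag_z"),
-- ]
--
--
-- def _expand_sensor_selectors(selectors):
--     wanted = set(selectors)
--     return [channel for group, channel in _CHANNELS
--             if "sensor" in wanted or group in wanted or channel in wanted]
-- ===== Notes on version B (the rewrite author's own statement) =====
-- stated objective: simpler
-- what changed: Inverted the traversal: instead of expanding selectors into a set of channels and sorting it, B makes one pass over the fixed already-sorted (group, channel) table and keeps each channel whose name, group, or the blanket keyword 'sensor' is among the selectors, so no sort and no result set is needed.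
import Mathlib
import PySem

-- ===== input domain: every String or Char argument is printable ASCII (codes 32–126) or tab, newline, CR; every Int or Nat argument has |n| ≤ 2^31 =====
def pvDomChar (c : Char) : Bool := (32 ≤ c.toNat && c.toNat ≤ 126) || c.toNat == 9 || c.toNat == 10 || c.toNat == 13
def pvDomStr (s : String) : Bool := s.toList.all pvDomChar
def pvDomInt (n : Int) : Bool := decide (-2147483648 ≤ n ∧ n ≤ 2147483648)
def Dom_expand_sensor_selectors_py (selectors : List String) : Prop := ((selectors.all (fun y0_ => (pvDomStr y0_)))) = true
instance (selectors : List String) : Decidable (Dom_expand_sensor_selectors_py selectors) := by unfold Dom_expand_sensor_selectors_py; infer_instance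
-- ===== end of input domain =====

-- B inverts the traversal: it filters the fixed, already-sorted (group, channel) table by
-- membership of the channel / its group / "sensor" in the selectors, so no result set and
-- no sort are needed (simpler; same cost).

-- ===== PORT A =====
def expand_sensor_selectors_py (selectors : List String) : List String :=
  let expanded : PySem.Set String := PySem.Set.empty
  let expanded := if "sensor" ∈ selectors then
      PySem.Set.update expanded
        ["acc_x", "acc_y", "acc_z", "gyro_x", "gyro_y", "gyro_z", "mag_x", "mag_y", "mag_z"]
    else expanded
  let expanded := if "acc" ∈ selectors then
      PySem.Set.update expanded ["acc_x", "acc_y", "acc_z"] else expanded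
  let expanded := if "gyro" ∈ selectors then
      PySem.Set.update expanded ["gyro_x", "gyro_y", "gyro_z"] else expanded
  let expanded := if "mag" ∈ selectors then
      PySem.Set.update expanded ["mag_x", "mag_y", "mag_z"] else expanded
  let expanded := selectors.foldl (fun acc selector =>
      if selector ∈ PySem.Set.ofList
          ["acc_x", "acc_y", "acc_z", "gyro_x", "gyro_y", "gyro_z", "mag_x", "mag_y", "mag_z"] then
        PySem.Set.add acc selector
      else acc) expanded
  PySem.List.sorted expanded (fun x => x) false

-- ===== PORT B =====
def pvChannels : List (String × String) :=
  [("acc", "acc_x"), ("acc", "acc_y"), ("acc", "acc_z"),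
   ("gyro", "gyro_x"), ("gyro", "gyro_y"), ("gyro", "gyro_z"),
   ("mag", "mag_x"), ("mag", "mag_y"), ("mag", "mag_z")]

def expand_sensor_selectors_py_alt (selectors : List String) : List String :=
  let wanted : PySem.Set String := PySem.Set.ofList selectors
  (pvChannels.filter (fun gc =>
      PySem.Set.contains wanted "sensor" || PySem.Set.contains wanted gc.1 ||
      PySem.Set.contains wanted gc.2)).map (fun gc => gc.2)

-- ===== PRECONDITION & SPEC =====
def Spec_expand_sensor_selectors_py (selectors : List String) (out : List String) : Prop := out = expand_sensor_selectors_py_alt selectors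
instance (selectors : List String) (out : List String) : Decidable (Spec_expand_sensor_selectors_py selectors out) := by unfold Spec_expand_sensor_selectors_py; infer_instance

-- ===== CLAIM (what is proved, stated in full; the proofs are below) =====
def Claim_equal_expand_sensor_selectors_py : Prop := ∀ (selectors : List String), Dom_expand_sensor_selectors_py selectors → Spec_expand_sensor_selectors_py selectors (expand_sensor_selectors_py selectors)

-- ===== LEMMAS AND PROOFS =====

def pvChans : List String :=
  ["acc_x", "acc_y", "acc_z", "gyro_x", "gyro_y", "gyro_z", "mag_x", "mag_y", "mag_z"]

-- the elements both programs end up collecting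
def pvKeep (sel : List String) (x : String) : Prop :=
  ("sensor" ∈ sel ∧ x ∈ pvChans) ∨
  ("acc" ∈ sel ∧ x ∈ (["acc_x", "acc_y", "acc_z"] : List String)) ∨
  ("gyro" ∈ sel ∧ x ∈ (["gyro_x", "gyro_y", "gyro_z"] : List String)) ∨
  ("mag" ∈ sel ∧ x ∈ (["mag_x", "mag_y", "mag_z"] : List String)) ∨
  (x ∈ sel ∧ x ∈ pvChans)

-- A's set before sorting, spelled out so that expand_sensor_selectors_py = sorted(pvExpandedA) by rfl
def pvBaseA (sel : List String) : PySem.Set String :=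
  let expanded : PySem.Set String := PySem.Set.empty
  let expanded := if "sensor" ∈ sel then
      PySem.Set.update expanded
        ["acc_x", "acc_y", "acc_z", "gyro_x", "gyro_y", "gyro_z", "mag_x", "mag_y", "mag_z"]
    else expanded
  let expanded := if "acc" ∈ sel then
      PySem.Set.update expanded ["acc_x", "acc_y", "acc_z"] else expanded
  let expanded := if "gyro" ∈ sel then
      PySem.Set.update expanded ["gyro_x", "gyro_y", "gyro_z"] else expanded
  if "mag" ∈ sel then PySem.Set.update expanded ["mag_x", "mag_y", "mag_z"] else expanded

def pvExpandedA (sel : List String) : PySem.Set String :=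
  sel.foldl (fun acc selector =>
      if selector ∈ PySem.Set.ofList
          ["acc_x", "acc_y", "acc_z", "gyro_x", "gyro_y", "gyro_z", "mag_x", "mag_y", "mag_z"] then
        PySem.Set.add acc selector
      else acc) (pvBaseA sel)

theorem pv_A_eq (sel : List String) :
    expand_sensor_selectors_py sel = PySem.List.sorted (pvExpandedA sel) (fun x => x) false := rfl

theorem pv_mem_ite_update {P : Prop} [Decidable P] (s : PySem.Set String) (l : List String)
    (x : String) :
    x ∈ (if P then PySem.Set.update s l else s) ↔ x ∈ s ∨ (P ∧ x ∈ l) := by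
  split_ifs with h <;> simp [PySem.Set.mem_update, h]

theorem pv_nodup_ite_update {P : Prop} [Decidable P] {s : PySem.Set String} (l : List String)
    (hnd : s.Nodup) : (if P then PySem.Set.update s l else s).Nodup := by
  split_ifs with h
  · exact PySem.Set.nodup_update _ _ hnd
  · exact hnd

theorem pv_mem_baseA (sel : List String) (x : String) :
    x ∈ pvBaseA sel ↔
      ("sensor" ∈ sel ∧ x ∈ pvChans) ∨
      ("acc" ∈ sel ∧ x ∈ (["acc_x", "acc_y", "acc_z"] : List String)) ∨
      ("gyro" ∈ sel ∧ x ∈ (["gyro_x", "gyro_y", "gyro_z"] : List String)) ∨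
      ("mag" ∈ sel ∧ x ∈ (["mag_x", "mag_y", "mag_z"] : List String)) := by
  unfold pvBaseA
  rw [pv_mem_ite_update, pv_mem_ite_update, pv_mem_ite_update, pv_mem_ite_update]
  simp [PySem.Set.empty, pvChans, or_assoc]

theorem pv_nodup_baseA (sel : List String) : (pvBaseA sel).Nodup := by
  unfold pvBaseA
  exact pv_nodup_ite_update _ (pv_nodup_ite_update _ (pv_nodup_ite_update _
    (pv_nodup_ite_update _ List.nodup_nil)))

theorem pv_mem_foldl_add_if {sel : List String} {acc : PySem.Set String} {x : String}
    (hnd : acc.Nodup) :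
    (x ∈ sel.foldl (fun acc selector =>
        if selector ∈ PySem.Set.ofList pvChans then PySem.Set.add acc selector else acc) acc
      ↔ x ∈ acc ∨ (x ∈ sel ∧ x ∈ pvChans)) ∧
    (sel.foldl (fun acc selector =>
        if selector ∈ PySem.Set.ofList pvChans then PySem.Set.add acc selector else acc) acc).Nodup := by
  induction sel generalizing acc with
  | nil => simpa using hnd
  | cons s rest ih =>
    by_cases hs : s ∈ PySem.Set.ofList pvChans
    · have hs' : s ∈ pvChans := (PySem.Set.mem_ofList _ _).mp hs
      have hnd' : (PySem.Set.add acc s).Nodup := PySem.Set.nodup_add _ _ hnd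
      have := ih hnd'
      constructor
      · rw [List.foldl_cons, if_pos hs, (this.1)]
        simp only [PySem.Set.mem_add, List.mem_cons]
        constructor
        · rintro ((h | rfl) | ⟨h1, h2⟩)
          · exact Or.inl h
          · exact Or.inr ⟨Or.inl rfl, hs'⟩
          · exact Or.inr ⟨Or.inr h1, h2⟩
        · rintro (h | ⟨(rfl | h1), h2⟩)
          · exact Or.inl (Or.inl h)
          · exact Or.inl (Or.inr rfl)
          · exact Or.inr ⟨h1, h2⟩
      · rw [List.foldl_cons, if_pos hs]; exact this.2
    · have := ih hnd
      constructor
      · rw [List.foldl_cons, if_neg hs, (this.1)]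
        have hs'' : s ∉ pvChans := fun h => hs ((PySem.Set.mem_ofList _ _).mpr h)
        simp only [List.mem_cons]
        constructor
        · rintro (h | ⟨h1, h2⟩)
          · exact Or.inl h
          · exact Or.inr ⟨Or.inr h1, h2⟩
        · rintro (h | ⟨(rfl | h1), h2⟩)
          · exact Or.inl h
          · exact absurd h2 hs''
          · exact Or.inr ⟨h1, h2⟩
      · rw [List.foldl_cons, if_neg hs]; exact this.2

theorem pv_mem_expandedA (sel : List String) (x : String) :
    x ∈ pvExpandedA sel ↔ pvKeep sel x := by
  unfold pvExpandedA pvKeep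
  have h := pv_mem_foldl_add_if (sel := sel) (acc := pvBaseA sel) (x := x) (pv_nodup_baseA sel)
  rw [show (["acc_x", "acc_y", "acc_z", "gyro_x", "gyro_y", "gyro_z", "mag_x", "mag_y", "mag_z"] :
        List String) = pvChans from rfl, h.1, pv_mem_baseA]
  tauto

theorem pv_nodup_expandedA (sel : List String) : (pvExpandedA sel).Nodup := by
  unfold pvExpandedA
  rw [show (["acc_x", "acc_y", "acc_z", "gyro_x", "gyro_y", "gyro_z", "mag_x", "mag_y", "mag_z"] :
        List String) = pvChans from rfl]
  exact (pv_mem_foldl_add_if (x := "") (pv_nodup_baseA sel)).2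

theorem pv_keep_chans {sel : List String} {x : String} (h : pvKeep sel x) : x ∈ pvChans := by
  rcases h with ⟨_, h⟩ | ⟨_, h⟩ | ⟨_, h⟩ | ⟨_, h⟩ | ⟨_, h⟩ <;>
    simp only [pvChans, List.mem_cons, List.not_mem_nil, or_false] at h ⊢ <;> tauto

theorem pv_B_sublist (sel : List String) :
    (expand_sensor_selectors_py_alt sel).Sublist pvChans := by
  have hmap : pvChans = pvChannels.map (fun gc : String × String => gc.2) := rfl
  show ((pvChannels.filter _).map (fun gc : String × String => gc.2)).Sublist pvChans
  rw [hmap]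
  exact List.Sublist.map _ List.filter_sublist

theorem pv_mem_B (sel : List String) (x : String) :
    x ∈ expand_sensor_selectors_py_alt sel ↔ pvKeep sel x := by
  have hB : x ∈ expand_sensor_selectors_py_alt sel ↔
      ∃ gc ∈ pvChannels, (("sensor" ∈ sel ∨ gc.1 ∈ sel) ∨ gc.2 ∈ sel) ∧ gc.2 = x := by
    simp [expand_sensor_selectors_py_alt, List.mem_filter, PySem.Set.mem_ofList, and_assoc]
  by_cases hx : x ∈ pvChans
  · fin_cases hx <;> rw [hB] <;> simp [pvChannels, pvKeep, pvChans] <;> tauto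
  · constructor
    · intro hmem; exact absurd ((pv_B_sublist sel).subset hmem) hx
    · intro hk; exact absurd (pv_keep_chans hk) hx

theorem pv_B_pairwise (sel : List String) :
    (expand_sensor_selectors_py_alt sel).Pairwise (· < ·) := by
  have h : pvChans.Pairwise (fun a b => a.toList < b.toList) := by decide
  exact (h.imp (fun h => String.lt_iff_toList_lt.mpr h)).sublist (pv_B_sublist sel)

-- ===== VERDICT (by name: the statement is the Claim_ definition above) =====
theorem expand_sensor_selectors_py_spec : Claim_equal_expand_sensor_selectors_py := by
  intro sel _
  unfold Spec_expand_sensor_selectors_py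
  rw [pv_A_eq]
  have hndB : (expand_sensor_selectors_py_alt sel).Nodup :=
    (pv_B_pairwise sel).imp fun h => ne_of_lt h
  have hperm : (expand_sensor_selectors_py_alt sel).Perm (pvExpandedA sel) :=
    (List.perm_ext_iff_of_nodup hndB (pv_nodup_expandedA sel)).mpr
      (fun a => by rw [pv_mem_B, pv_mem_expandedA])
  exact PySem.List.sorted_eq_of_perm_of_pairwise_lt _ _ _ hperm (pv_B_pairwise sel)
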